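-- pv_equiv track=rewrite | github.com/ihmeuw/idd-tc-mortality | src/idd_tc_mortality/select/model_selection.py | _find_cd_cliques
-- ===== SOURCE A (Python) =====
-- def _find_cd_cliques(sorted_ranks, cd):
--     """Greedy clique finder: maximal contiguous groups within CD of the leftmost member."""
--     n = len(sorted_ranks)
--     cliques = []
--     used: set = set()
--     for i in range(n):
--         if i in used:
--             continue
--         j = i
--         while j + 1 < n and (sorted_ranks[j + 1] - sorted_ranks[i]) <= cd:
--             j += 1
--         if j > i:
--             cliques.append((i, j))
--             for k in range(i, j + 1):
--                 used.add(k)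
--     return cliques
-- ===== SOURCE B (Python) =====
-- def _find_cd_cliques(sorted_ranks, cd):
--     """Single flat pass with an anchor: close the current window at each break
--     point (recording it only if it holds more than one index) and re-anchor at
--     the breaking index; flush the last window after the loop. No inner scan,
--     no bookkeeping set."""
--     cliques = []
--     s = 0
--     for k in range(1, len(sorted_ranks)):
--         if sorted_ranks[k] - sorted_ranks[s] > cd:
--             if k - 1 > s:
--                 cliques.append((s, k - 1))
--             s = k
--     if len(sorted_ranks) - 1 > s:
--         cliques.append((s, len(sorted_ranks) - 1))
--     return cliques
-- ===== Notes on version B (the rewrite author's own statement) =====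
-- stated objective: simpler
-- what changed: Replaced A's nested structure (outer for over all indices + inner while scan per anchor + a `used` set filled and consulted to skip grouped indices) by a single flat pass that keeps one anchor index, closes the current window at each break point (recording it only when it spans more than one index) and re-anchors there, with one flush after the loop; no inner loop and no set remain, which also removes the per-index set lookups and insertions.
import Mathlib
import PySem

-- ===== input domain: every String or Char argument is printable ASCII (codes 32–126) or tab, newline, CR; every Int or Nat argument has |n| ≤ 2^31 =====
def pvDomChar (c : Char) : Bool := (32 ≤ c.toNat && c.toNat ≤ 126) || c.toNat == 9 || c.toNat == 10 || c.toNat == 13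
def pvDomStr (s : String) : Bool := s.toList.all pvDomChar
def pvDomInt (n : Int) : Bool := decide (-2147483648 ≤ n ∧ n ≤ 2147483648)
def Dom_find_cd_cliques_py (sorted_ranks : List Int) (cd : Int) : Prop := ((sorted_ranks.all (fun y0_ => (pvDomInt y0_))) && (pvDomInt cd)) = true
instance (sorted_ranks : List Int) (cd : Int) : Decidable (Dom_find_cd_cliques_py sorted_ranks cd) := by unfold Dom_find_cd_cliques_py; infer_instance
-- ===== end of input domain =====

-- B replaces A's nested structure (outer for over all indices + inner while scan per
-- anchor + a `used` set that skips grouped indices) by one flat pass keeping an anchor,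
-- closing the window at each break point and flushing once at the end (objective: simpler).

-- ===== PORT A =====
-- A's inner `while j + 1 < n and (sorted_ranks[j+1] - sorted_ranks[i]) <= cd: j += 1`.
-- Indexing is PySem.List.pyGetD …: the guard j + 1 < n (and 0 ≤ i from range) keeps every
-- access in range, so the default is never used and this is exact.
def pvAWhile (sorted_ranks : List Int) (cd n i j : Int) : Int :=
  if _h : j + 1 < n ∧
      PySem.List.pyGetD sorted_ranks (j + 1) 0 - PySem.List.pyGetD sorted_ranks i 0 ≤ cd then
    pvAWhile sorted_ranks cd n i (j + 1)
  else j
termination_by (n - j).toNat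
decreasing_by omega

-- one iteration of A's `for i in range(n)` body over the state (cliques, used)
def pvABody (sorted_ranks : List Int) (cd n : Int)
    (st : List (Int × Int) × PySem.Set Int) (i : Int) : List (Int × Int) × PySem.Set Int :=
  if PySem.Set.contains st.2 i then st          -- `if i in used: continue`
  else
    let j := pvAWhile sorted_ranks cd n i i
    if j > i then
      (st.1 ++ [(i, j)],
       (PySem.List.pyRange i (j + 1) 1).foldl (fun u k => PySem.Set.add u k) st.2)
    else st

def find_cd_cliques_py (sorted_ranks : List Int) (cd : Int) : List (Int × Int) :=
  let n : Int := sorted_ranks.length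
  ((PySem.List.pyRange 0 n 1).foldl (pvABody sorted_ranks cd n)
    ([], PySem.Set.empty)).1

-- ===== PORT B =====
-- body of B's `for k in range(1, len(sorted_ranks))`: state = (cliques, anchor s)
def pvBStep (sorted_ranks : List Int) (cd : Int)
    (st : List (Int × Int) × Int) (k : Int) : List (Int × Int) × Int :=
  if PySem.List.pyGetD sorted_ranks k 0 - PySem.List.pyGetD sorted_ranks st.2 0 > cd then
    (if k - 1 > st.2 then st.1 ++ [(st.2, k - 1)] else st.1, k)
  else st

def find_cd_cliques_py_alt (sorted_ranks : List Int) (cd : Int) : List (Int × Int) :=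
  let n : Int := sorted_ranks.length
  let st := (PySem.List.pyRange 1 n 1).foldl (pvBStep sorted_ranks cd) ([], 0)
  if n - 1 > st.2 then st.1 ++ [(st.2, n - 1)] else st.1

-- ===== PRECONDITION & SPEC =====
def Spec_find_cd_cliques_py (sorted_ranks : List Int) (cd : Int) (out : List (Int × Int)) : Prop := out = find_cd_cliques_py_alt sorted_ranks cd
instance (sorted_ranks : List Int) (cd : Int) (out : List (Int × Int)) : Decidable (Spec_find_cd_cliques_py sorted_ranks cd out) := by unfold Spec_find_cd_cliques_py; infer_instance

-- ===== CLAIM (what is proved, stated in full; the proofs are below) =====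
def Claim_equal_find_cd_cliques_py : Prop := ∀ (sorted_ranks : List Int) (cd : Int), Dom_find_cd_cliques_py sorted_ranks cd → Spec_find_cd_cliques_py sorted_ranks cd (find_cd_cliques_py sorted_ranks cd)

-- ===== LEMMAS AND PROOFS =====

-- proof-side helper: the first index in [i+1, n) breaking the window of anchor i, or n
def pvStop (sorted_ranks : List Int) (cd n i : Int) : Int :=
  ((PySem.List.pyRange (i + 1) n 1).find?
    (fun k => decide (cd < PySem.List.pyGetD sorted_ranks k 0 - PySem.List.pyGetD sorted_ranks i 0))).getD n

-- proof-side helper: B's final flush, applied to the fold's end state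
def pvBFinish (n : Int) (st : List (Int × Int) × Int) : List (Int × Int) :=
  if n - 1 > st.2 then st.1 ++ [(st.2, n - 1)] else st.1

theorem pvStop_bounds (sorted_ranks : List Int) (cd n i : Int) (hi : i < n) :
    i + 1 ≤ pvStop sorted_ranks cd n i ∧ pvStop sorted_ranks cd n i ≤ n := by
  unfold pvStop
  cases hf : (PySem.List.pyRange (i + 1) n 1).find?
      (fun k => decide (cd < PySem.List.pyGetD sorted_ranks k 0 - PySem.List.pyGetD sorted_ranks i 0)) with
  | none => simp; omega
  | some k =>
    have hk := List.mem_of_find?_eq_some hf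
    rw [PySem.List.mem_pyRange_one] at hk
    simp; omega

-- all indices strictly between i and pvStop stay inside the window of anchor i
theorem pvStop_spec_le (sorted_ranks : List Int) (cd n i : Int) :
    ∀ k, i < k → k < pvStop sorted_ranks cd n i →
      PySem.List.pyGetD sorted_ranks k 0 - PySem.List.pyGetD sorted_ranks i 0 ≤ cd := by
  intro k hk1 hk2
  by_contra hgt
  push_neg at hgt
  have hkn : k < n := lt_of_lt_of_le hk2 (by
    unfold pvStop
    cases hf : (PySem.List.pyRange (i + 1) n 1).find?
        (fun k => decide (cd < PySem.List.pyGetD sorted_ranks k 0 - PySem.List.pyGetD sorted_ranks i 0)) with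
    | none => simp
    | some m =>
      have hm := List.mem_of_find?_eq_some hf
      rw [PySem.List.mem_pyRange_one] at hm
      simp; omega)
  have hmem : k ∈ PySem.List.pyRange (i + 1) n 1 := by
    rw [PySem.List.mem_pyRange_one]; omega
  unfold pvStop at hk2
  cases hf : (PySem.List.pyRange (i + 1) n 1).find?
      (fun k => decide (cd < PySem.List.pyGetD sorted_ranks k 0 - PySem.List.pyGetD sorted_ranks i 0)) with
  | none =>
    have := List.find?_eq_none.mp hf k hmem
    simp at this; omega
  | some m =>
    rw [hf] at hk2
    simp at hk2
    -- m is the first break; k < m breaks too — contradiction with minimality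
    rw [show PySem.List.pyRange (i + 1) n 1 =
        PySem.List.pyRange (i + 1) k 1 ++ PySem.List.pyRange k n 1 from
      PySem.List.pyRange_one_append (i + 1) k n (by omega) (by omega),
      List.find?_append] at hf
    cases hf1 : (PySem.List.pyRange (i + 1) k 1).find?
        (fun k => decide (cd < PySem.List.pyGetD sorted_ranks k 0 - PySem.List.pyGetD sorted_ranks i 0)) with
    | some m' =>
      rw [hf1] at hf
      simp at hf
      have hm' := List.mem_of_find?_eq_some hf1
      rw [PySem.List.mem_pyRange_one] at hm'
      omega
    | none =>
      rw [hf1] at hf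
      simp at hf
      rw [PySem.List.pyRange_one_cons (by omega : k < n),
        List.find?_cons_of_pos (by simp only [decide_eq_true_eq]; omega)] at hf
      simp at hf; omega

-- the index pvStop itself breaks the window when it is < n
theorem pvStop_spec_gt (sorted_ranks : List Int) (cd n i : Int)
    (h : pvStop sorted_ranks cd n i < n) :
    cd < PySem.List.pyGetD sorted_ranks (pvStop sorted_ranks cd n i) 0 -
         PySem.List.pyGetD sorted_ranks i 0 := by
  unfold pvStop at h ⊢
  cases hf : (PySem.List.pyRange (i + 1) n 1).find?
      (fun k => decide (cd < PySem.List.pyGetD sorted_ranks k 0 - PySem.List.pyGetD sorted_ranks i 0)) with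
  | none => rw [hf] at h; simp at h
  | some m =>
    have := List.find?_some hf
    simp at this
    simpa [hf] using this

-- A's inner scan lands exactly one before pvStop
theorem pvAWhile_eq_stop (sorted_ranks : List Int) (cd n : Int) (i : Int) :
    ∀ d j, i ≤ j → j < n → (n - j).toNat ≤ d →
    (∀ k, i < k → k ≤ j →
      PySem.List.pyGetD sorted_ranks k 0 - PySem.List.pyGetD sorted_ranks i 0 ≤ cd) →
    pvAWhile sorted_ranks cd n i j = pvStop sorted_ranks cd n i - 1 := by
  intro d
  induction d with
  | zero => intro j h1 h2 h3 _; omega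
  | succ d ih =>
    intro j hij hjn hd hall
    rw [pvAWhile]
    by_cases hcond : j + 1 < n ∧
        PySem.List.pyGetD sorted_ranks (j + 1) 0 - PySem.List.pyGetD sorted_ranks i 0 ≤ cd
    · rw [dif_pos hcond]
      exact ih (j + 1) (by omega) hcond.1 (by omega)
        (fun k hk1 hk2 => by
          by_cases hk : k ≤ j
          · exact hall k hk1 hk
          · have : k = j + 1 := by omega
            subst this; exact hcond.2)
    · rw [dif_neg hcond]
      unfold pvStop
      by_cases hn : j + 1 < n
      · have hfail : ¬ (PySem.List.pyGetD sorted_ranks (j + 1) 0 -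
            PySem.List.pyGetD sorted_ranks i 0 ≤ cd) := by
          intro h; exact hcond ⟨hn, h⟩
        rw [PySem.List.pyRange_one_append (i + 1) (j + 1) n (by omega) (by omega),
          List.find?_append]
        have h1 : (PySem.List.pyRange (i + 1) (j + 1) 1).find?
            (fun k => decide (cd < PySem.List.pyGetD sorted_ranks k 0 - PySem.List.pyGetD sorted_ranks i 0)) = none := by
          rw [List.find?_eq_none]
          intro x hx
          rw [PySem.List.mem_pyRange_one] at hx
          simp only [decide_eq_true_eq, not_lt]
          exact hall x (by omega) (by omega)
        rw [h1, PySem.List.pyRange_one_cons (by omega : j + 1 < n)]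
        rw [List.find?_cons_of_pos (by simp only [decide_eq_true_eq]; omega)]
        simp
      · have h1 : (PySem.List.pyRange (i + 1) n 1).find?
            (fun k => decide (cd < PySem.List.pyGetD sorted_ranks k 0 - PySem.List.pyGetD sorted_ranks i 0)) = none := by
          rw [List.find?_eq_none]
          intro x hx
          rw [PySem.List.mem_pyRange_one] at hx
          simp only [decide_eq_true_eq, not_lt]
          exact hall x (by omega) (by omega)
        rw [h1]
        simp; omega

-- membership in a set after adding every element of a list
theorem contains_foldl_add (l : List Int) (s : PySem.Set Int) (x : Int) :
    PySem.Set.contains (l.foldl (fun u k => PySem.Set.add u k) s) x = true ↔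
    x ∈ s ∨ x ∈ l := by
  rw [PySem.Set.contains_iff]
  exact PySem.Set.mem_foldl_add (f := fun k => k) (l := l) (s := s) (y := x) |>.trans
    (by simp)

-- A's fold returns the state unchanged over a block of indices that are all `used`
theorem foldl_skip (sorted_ranks : List Int) (cd n : Int) :
    ∀ (l : List Int) (st : List (Int × Int) × PySem.Set Int),
    (∀ k ∈ l, PySem.Set.contains st.2 k = true) →
    l.foldl (pvABody sorted_ranks cd n) st = st := by
  intro l
  induction l with
  | nil => intro st _; rfl
  | cons a l ih =>
    intro st h
    have ha : PySem.Set.contains st.2 a = true := h a (by simp)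
    simp only [List.foldl_cons]
    rw [show pvABody sorted_ranks cd n st a = st by unfold pvABody; rw [if_pos ha]]
    exact ih st (fun k hk => h k (by simp [hk]))

-- B's fold returns the state unchanged over a block of non-breaking indices
theorem bfoldl_skip (sorted_ranks : List Int) (cd : Int) :
    ∀ (l : List Int) (acc : List (Int × Int)) (i : Int),
    (∀ k ∈ l, PySem.List.pyGetD sorted_ranks k 0 - PySem.List.pyGetD sorted_ranks i 0 ≤ cd) →
    l.foldl (pvBStep sorted_ranks cd) (acc, i) = (acc, i) := by
  intro l
  induction l with
  | nil => intro acc i _; rfl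
  | cons a l ih =>
    intro acc i h
    have ha := h a (by simp)
    simp only [List.foldl_cons]
    rw [show pvBStep sorted_ranks cd (acc, i) a = (acc, i) by
      unfold pvBStep; rw [if_neg (by simp; omega)]]
    exact ih acc i (fun k hk => h k (by simp [hk]))

-- main invariant: A's remaining fold from cursor i (nothing ≥ i marked used) equals
-- B's remaining fold from index i+1 with anchor i, followed by B's final flush
theorem pvMain (sorted_ranks : List Int) (cd : Int) :
    ∀ d (i : Int) (acc : List (Int × Int)) (used : PySem.Set Int),
    ((sorted_ranks.length : Int) - i).toNat ≤ d →
    (∀ k, i ≤ k → PySem.Set.contains used k = false) →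
    ((PySem.List.pyRange i (sorted_ranks.length : Int) 1).foldl
        (pvABody sorted_ranks cd (sorted_ranks.length : Int)) (acc, used)).1 =
      pvBFinish (sorted_ranks.length : Int)
        ((PySem.List.pyRange (i + 1) (sorted_ranks.length : Int) 1).foldl
          (pvBStep sorted_ranks cd) (acc, i)) := by
  set n : Int := (sorted_ranks.length : Int) with hn
  intro d
  induction d with
  | zero =>
    intro i acc used hd _
    have hni : n ≤ i := by omega
    rw [PySem.List.pyRange_one_eq_nil hni, PySem.List.pyRange_one_eq_nil (by omega : n ≤ i + 1)]
    simp [pvBFinish, show ¬ n - 1 > i by omega]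
  | succ d ih =>
    intro i acc used hd hused
    by_cases hi : i < n
    · have hstop := pvStop_bounds sorted_ranks cd n i hi
      set stop : Int := pvStop sorted_ranks cd n i with hstopdef
      have hAw : pvAWhile sorted_ranks cd n i i = stop - 1 :=
        pvAWhile_eq_stop sorted_ranks cd n i (n - i).toNat i le_rfl hi le_rfl
          (fun k h1 h2 => by omega)
      have hci : PySem.Set.contains used i = false := hused i le_rfl
      -- B side: the non-breaking block (i+1, stop) leaves the state (acc, i) unchanged
      have hBskip : (PySem.List.pyRange (i + 1) stop 1).foldl
          (pvBStep sorted_ranks cd) (acc, i) = (acc, i) :=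
        bfoldl_skip sorted_ranks cd _ acc i (by
          intro k hk
          rw [PySem.List.mem_pyRange_one] at hk
          exact pvStop_spec_le sorted_ranks cd n i k (by omega) (by omega))
      rw [PySem.List.pyRange_one_cons hi, List.foldl_cons]
      by_cases hsn : stop < n
      · -- the break at index `stop` exists
        have hbrk := pvStop_spec_gt sorted_ranks cd n i hsn
        -- B side: split (i+1, n) = (i+1, stop) ++ [stop] ++ (stop+1, n)
        have hBsplit : (PySem.List.pyRange (i + 1) n 1).foldl
            (pvBStep sorted_ranks cd) (acc, i) =
            (PySem.List.pyRange (stop + 1) n 1).foldl (pvBStep sorted_ranks cd)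
              ((if stop - 1 > i then acc ++ [(i, stop - 1)] else acc), stop) := by
          rw [PySem.List.pyRange_one_append (i + 1) stop n (by omega) (by omega),
            List.foldl_append, hBskip,
            PySem.List.pyRange_one_cons (by omega : stop < n), List.foldl_cons]
          congr 1
          unfold pvBStep
          rw [if_pos (by simp; omega)]
        rw [hBsplit]
        by_cases hgt : stop - 1 > i
        · -- A records the clique (i, stop-1) and marks i..stop-1 used
          have hbody : pvABody sorted_ranks cd n (acc, used) i =
              (acc ++ [(i, stop - 1)],
               (PySem.List.pyRange i stop 1).foldl (fun u k => PySem.Set.add u k) used) := by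
            simp only [pvABody, hci, Bool.false_eq_true, if_false, hAw]
            rw [if_pos hgt, show stop - 1 + 1 = stop by ring]
          rw [hbody]
          set used' := (PySem.List.pyRange i stop 1).foldl (fun u k => PySem.Set.add u k) used
            with hused'
          have hmem : ∀ x, PySem.Set.contains used' x = true ↔
              x ∈ used ∨ x ∈ PySem.List.pyRange i stop 1 := fun x =>
            contains_foldl_add _ used x
          rw [PySem.List.pyRange_one_append (i + 1) stop n (by omega) (by omega),
            List.foldl_append]
          rw [foldl_skip sorted_ranks cd n (PySem.List.pyRange (i + 1) stop 1)
            (acc ++ [(i, stop - 1)], used') (by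
            intro k hk
            show PySem.Set.contains used' k = true
            rw [hmem k]
            right; rw [PySem.List.mem_pyRange_one] at hk ⊢; omega)]
          rw [if_pos hgt]
          exact ih stop (acc ++ [(i, stop - 1)]) used' (by omega) (by
            intro k hk
            cases h : PySem.Set.contains used' k with
            | false => rfl
            | true =>
              exfalso
              rcases (hmem k).mp h with h' | h'
              · have h2 := hused k (by omega)
                have h3 : PySem.Set.contains used k = true := (PySem.Set.contains_iff used k).mpr h'
                rw [h2] at h3; exact Bool.false_ne_true h3
              · rw [PySem.List.mem_pyRange_one] at h'; omega)
        · -- singleton: stop = i + 1, nothing recorded on either side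
          have hbody : pvABody sorted_ranks cd n (acc, used) i = (acc, used) := by
            simp only [pvABody, hci, Bool.false_eq_true, if_false, hAw]
            rw [if_neg (by omega)]
          rw [hbody, if_neg hgt]
          rw [show i + 1 = stop by omega]
          exact ih stop acc used (by omega) (fun k hk => hused k (by omega))
      · -- stop = n: no break through the end; A may record (i, n-1), B flushes it
        have hsn' : stop = n := by omega
        have hBall : (PySem.List.pyRange (i + 1) n 1).foldl
            (pvBStep sorted_ranks cd) (acc, i) = (acc, i) := by
          rw [← hsn']; exact hBskip
        rw [hBall]
        by_cases hgt : stop - 1 > i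
        · have hbody : pvABody sorted_ranks cd n (acc, used) i =
              (acc ++ [(i, stop - 1)],
               (PySem.List.pyRange i stop 1).foldl (fun u k => PySem.Set.add u k) used) := by
            simp only [pvABody, hci, Bool.false_eq_true, if_false, hAw]
            rw [if_pos hgt, show stop - 1 + 1 = stop by ring]
          rw [hbody]
          set used' := (PySem.List.pyRange i stop 1).foldl (fun u k => PySem.Set.add u k) used
          have hmem : ∀ x, PySem.Set.contains used' x = true ↔
              x ∈ used ∨ x ∈ PySem.List.pyRange i stop 1 := fun x =>
            contains_foldl_add _ used x
          rw [show PySem.List.pyRange (i + 1) n 1 = PySem.List.pyRange (i + 1) stop 1 from by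
            rw [hsn']]
          rw [foldl_skip sorted_ranks cd n (PySem.List.pyRange (i + 1) stop 1)
              (acc ++ [(i, stop - 1)], used') (by
            intro k hk
            show PySem.Set.contains used' k = true
            rw [hmem k]
            right; rw [PySem.List.mem_pyRange_one] at hk ⊢; omega)]
          unfold pvBFinish
          rw [if_pos (show n - 1 > (acc, i).2 by simp; omega)]
          simp only []
          rw [show stop - 1 = n - 1 by omega]
        · have hbody : pvABody sorted_ranks cd n (acc, used) i = (acc, used) := by
            simp only [pvABody, hci, Bool.false_eq_true, if_false, hAw]
            rw [if_neg (by omega)]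
          rw [hbody]
          rw [show PySem.List.pyRange (i + 1) n 1 = ([] : List Int) from
            PySem.List.pyRange_one_eq_nil (by omega)]
          simp only [List.foldl_nil]
          unfold pvBFinish
          rw [if_neg (show ¬ n - 1 > (acc, i).2 by simp; omega)]
    · rw [PySem.List.pyRange_one_eq_nil (by omega),
        PySem.List.pyRange_one_eq_nil (by omega : n ≤ i + 1)]
      simp [pvBFinish, show ¬ n - 1 > i by omega]

-- ===== VERDICT (by name: the statement is the Claim_ definition above) =====
theorem find_cd_cliques_py_spec : Claim_equal_find_cd_cliques_py := by
  intro sorted_ranks cd _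
  unfold Spec_find_cd_cliques_py find_cd_cliques_py find_cd_cliques_py_alt
  have h := pvMain sorted_ranks cd ((sorted_ranks.length : Int) - 0).toNat 0 [] PySem.Set.empty
    le_rfl (fun k _ => by rfl)
  simpa [pvBFinish] using h
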